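-- pv_equiv track=rewrite | github.com/tungnk-hust/NLP-learning | Word Embedding/word2vec/CBOW/inputdata.py | sample_training
-- ===== SOURCE A (Python) =====
-- def sample_training(corpus, word2idx, window_size=2):
--     training_samples = []
--     for sentence in corpus:
--         len_sentence = len(sentence)
--         for t in range(len_sentence):
--             context = []
--             for m in range(-window_size, window_size+1, 1):
--                 if (m != 0) and (t+m >= 0) and (t+m < len_sentence):
--                     context.append(word2idx[sentence[t+m]])
--             element = [context, word2idx[sentence[t]]]
--             training_samples.append(element)
--     return training_samples
-- ===== SOURCE B (Python) =====
-- def sample_training(corpus, word2idx, window_size=2):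
--     return [
--         [[word2idx[w] for w in sentence[max(0, t - window_size):t]
--                                + sentence[t + 1:max(t + 1, t + window_size + 1)]],
--          word2idx[word]]
--         for sentence in corpus
--         for t, word in enumerate(sentence)
--     ]
-- ===== Notes on version B (the rewrite author's own statement) =====
-- stated objective: simpler
-- what changed: The per-position offset loop over m in [-window_size, window_size] with the m!=0 test and two per-offset bounds checks is replaced by a single flat comprehension over enumerate(sentence) that builds each context from two bound-clamped slices (left and right neighbourhood) in one expression.
import Mathlib
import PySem

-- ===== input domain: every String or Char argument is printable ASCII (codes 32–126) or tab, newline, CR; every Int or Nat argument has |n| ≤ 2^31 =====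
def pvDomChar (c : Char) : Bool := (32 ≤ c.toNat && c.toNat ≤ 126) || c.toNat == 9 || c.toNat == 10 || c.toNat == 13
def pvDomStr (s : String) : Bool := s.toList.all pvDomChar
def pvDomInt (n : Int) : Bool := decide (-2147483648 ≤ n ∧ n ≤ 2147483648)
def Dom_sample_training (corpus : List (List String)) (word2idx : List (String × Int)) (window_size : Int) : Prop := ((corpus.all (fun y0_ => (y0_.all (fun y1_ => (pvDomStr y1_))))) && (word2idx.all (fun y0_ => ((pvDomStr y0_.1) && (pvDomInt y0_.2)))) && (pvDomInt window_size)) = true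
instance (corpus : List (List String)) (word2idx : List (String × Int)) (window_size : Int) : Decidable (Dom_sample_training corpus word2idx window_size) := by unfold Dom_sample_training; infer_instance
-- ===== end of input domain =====

-- B replaces A's per-offset loop (m from -window_size to window_size with the m ≠ 0 test
-- and two per-offset bounds checks) by one flat comprehension over enumerate(sentence)
-- building each context from two bound-clamped slices (objective: simpler).

-- word2idx[w]: first-match association-list lookup (Python dict lookup);
-- Pre_ guarantees the key is present, so the default 0 is never returned.
def w2i (d : List (String × Int)) (w : String) : Int :=
  (((d.find? (fun p => p.1 == w)).map Prod.snd).getD 0)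

-- ===== PORT A =====
def sample_training (corpus : List (List String)) (word2idx : List (String × Int)) (window_size : Int) : List (List Int × Int) :=
  corpus.foldl (fun training_samples sentence =>
    let len_sentence : Int := sentence.length
    (PySem.List.pyRange 0 len_sentence 1).foldl (fun ts t =>
      let context : List Int :=
        (PySem.List.pyRange (-window_size) (window_size + 1) 1).foldl (fun ctx m =>
          if m ≠ 0 ∧ t + m ≥ 0 ∧ t + m < len_sentence then
            ctx ++ [w2i word2idx (PySem.List.pyGetD sentence (t + m) "")]
          else ctx) []
      ts ++ [(context, w2i word2idx (PySem.List.pyGetD sentence t ""))]) training_samples) []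

-- ===== PORT B =====
def sample_training_alt (corpus : List (List String)) (word2idx : List (String × Int)) (window_size : Int) : List (List Int × Int) :=
  corpus.flatMap (fun sentence =>
    (PySem.List.enumerate sentence 0).map (fun tw =>
      ((PySem.List.slice sentence (some (max 0 (tw.1 - window_size))) (some tw.1)
        ++ PySem.List.slice sentence (some (tw.1 + 1)) (some (max (tw.1 + 1) (tw.1 + window_size + 1)))).map (w2i word2idx),
       w2i word2idx tw.2)))

-- ===== PRECONDITION & SPEC =====
-- Pre_ excludes exactly the corpora containing a word absent from word2idx,
-- on which A raises KeyError.
def Pre_sample_training (corpus : List (List String)) (word2idx : List (String × Int)) (window_size : Int) : Prop :=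
  ∀ s ∈ corpus, ∀ w ∈ s, ∃ p ∈ word2idx, p.1 = w
instance (corpus : List (List String)) (word2idx : List (String × Int)) (window_size : Int) : Decidable (Pre_sample_training corpus word2idx window_size) := by unfold Pre_sample_training; infer_instance

def pvWitness_sample_training : List (List String) × (List (String × Int)) × Int :=
  ([["the", "cat", "sat"], ["cat"]], [("the", 0), ("cat", 1), ("sat", 2)], 2)

def Spec_sample_training (corpus : List (List String)) (word2idx : List (String × Int)) (window_size : Int) (out : List (List Int × Int)) : Prop := out = sample_training_alt corpus word2idx window_size
instance (corpus : List (List String)) (word2idx : List (String × Int)) (window_size : Int) (out : List (List Int × Int)) : Decidable (Spec_sample_training corpus word2idx window_size out) := by unfold Spec_sample_training; infer_instance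

-- ===== CLAIM (what is proved, stated in full; the proofs are below) =====
def Claim_equal_sample_training : Prop := ∀ (corpus : List (List String)) (word2idx : List (String × Int)) (window_size : Int), Dom_sample_training corpus word2idx window_size → Pre_sample_training corpus word2idx window_size → Spec_sample_training corpus word2idx window_size (sample_training corpus word2idx window_size)

-- ===== LEMMAS AND PROOFS =====

theorem pyRange_map_shift {α : Type} (t a b : Int) (f : Int → α) :
    (PySem.List.pyRange a b 1).map (fun m => f (t + m))
      = (PySem.List.pyRange (t + a) (t + b) 1).map f := by
  rw [PySem.List.pyRange_one, PySem.List.pyRange_one]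
  simp only [List.map_map]
  have : (t + b) - (t + a) = b - a := by ring
  rw [this]
  apply List.map_congr_left
  intro k _
  simp [Function.comp]
  ring_nf

theorem filter_pyRange_ge (a b c : Int) :
    (PySem.List.pyRange a b 1).filter (fun m => decide (c ≤ m)) = PySem.List.pyRange (max a c) b 1 := by
  by_cases h : b ≤ a
  · rw [PySem.List.pyRange_one_eq_nil h, PySem.List.pyRange_one_eq_nil (by omega)]
    rfl
  · have hlt : a < b := by omega
    have ih := filter_pyRange_ge (a+1) b c
    rw [PySem.List.pyRange_one_cons hlt]
    by_cases hc : c ≤ a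
    · rw [List.filter_cons_of_pos (by simp; omega), ih,
        show max (a+1) c = a+1 by omega, show max a c = a by omega,
        ← PySem.List.pyRange_one_cons hlt]
    · rw [List.filter_cons_of_neg (by simp; omega), ih]
      congr 1
      omega
termination_by (b - a).toNat
decreasing_by omega

theorem filter_pyRange_lt (a b c : Int) :
    (PySem.List.pyRange a b 1).filter (fun m => decide (m < c)) = PySem.List.pyRange a (min b c) 1 := by
  by_cases h : b ≤ a
  · rw [PySem.List.pyRange_one_eq_nil h, PySem.List.pyRange_one_eq_nil (by omega)]
    rfl
  · have hlt : a < b := by omega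
    have ih := filter_pyRange_lt (a+1) b c
    rw [PySem.List.pyRange_one_cons hlt]
    by_cases hc : a < c
    · rw [List.filter_cons_of_pos (by simp; omega), ih,
        ← PySem.List.pyRange_one_cons (show a < min b c by omega)]
    · rw [List.filter_cons_of_neg (by simp; omega), ih,
        PySem.List.pyRange_one_eq_nil (by omega), PySem.List.pyRange_one_eq_nil (by omega)]
termination_by (b - a).toNat
decreasing_by omega

theorem map_pyGetD_pyRange_slice {α : Type} (xs : List α) (d : α) (a b : Int)
    (ha : 0 ≤ a) (hb0 : 0 ≤ b) (hb : b ≤ (xs.length : Int)) :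
    (PySem.List.pyRange a b 1).map (fun j => PySem.List.pyGetD xs j d)
      = PySem.List.slice xs (some a) (some b) := by
  rw [PySem.List.slice_toNat xs ha hb0]
  by_cases hab : b ≤ a
  · rw [PySem.List.pyRange_one_eq_nil hab, List.map_nil,
      show b.toNat - a.toNat = 0 by omega, List.take_zero]
  · have hab' : a ≤ b := by omega
    have key : List.map (fun j => PySem.List.pyGetD xs j d) (PySem.List.pyRange a b 1)
        ++ List.drop b.toNat xs = List.drop a.toNat xs := by
      rw [← PySem.List.map_pyGetD_pyRange' xs d hb0, ← List.map_append,
        ← PySem.List.pyRange_one_append a b (xs.length : Int) hab' hb,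
        PySem.List.map_pyGetD_pyRange' xs d ha]
    rw [← key, show b.toNat - a.toNat
        = (List.map (fun j => PySem.List.pyGetD xs j d) (PySem.List.pyRange a b 1)).length by
          simp [PySem.List.length_pyRange_one]; omega,
      List.take_left]

theorem slice_clamp_right {α : Type} (xs : List α) (t w : Int) (ht : 0 ≤ t) (hw : 0 ≤ w) :
    PySem.List.slice xs (some (t + 1)) (some (t + w + 1))
      = PySem.List.slice xs (some (t + 1)) (some (min (t + w + 1) (xs.length : Int))) := by
  by_cases h : t + w + 1 ≤ (xs.length : Int)
  · rw [show min (t + w + 1) ((xs.length : Int)) = t + w + 1 by omega]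
  · rw [PySem.List.slice_toNat xs (by omega) (by omega),
      PySem.List.slice_toNat xs (by omega) (by omega),
      List.take_of_length_le (by simp; omega), List.take_of_length_le (by simp; omega)]

theorem context_eq_nonneg (sentence : List String) (d : List (String × Int)) (w t : Int)
    (hw : 0 ≤ w) (ht0 : 0 ≤ t) (htn : t < (sentence.length : Int)) :
    (PySem.List.pyRange (-w) (w + 1) 1).foldl (fun ctx m =>
        if m ≠ 0 ∧ t + m ≥ 0 ∧ t + m < (sentence.length : Int) then
          ctx ++ [w2i d (PySem.List.pyGetD sentence (t + m) "")]
        else ctx) []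
      = (PySem.List.slice sentence (some (max 0 (t - w))) (some t)
          ++ PySem.List.slice sentence (some (t + 1)) (some (t + w + 1))).map (w2i d) := by
  rw [PySem.List.foldl_append_ite, List.nil_append,
    PySem.List.pyRange_one_append (-w) 0 (w+1) (by omega) (by omega),
    PySem.List.pyRange_one_cons (show (0:Int) < w + 1 by omega),
    List.filter_append, List.filter_cons_of_neg (by simp),
    show (0:Int) + 1 = 1 from by omega,
    List.filter_congr (l := PySem.List.pyRange (-w) 0 1)
      (q := fun m => decide (-t ≤ m))
      (by intro m hm; rw [PySem.List.mem_pyRange_one] at hm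
          simp only [decide_eq_decide]; omega),
    List.filter_congr (l := PySem.List.pyRange 1 (w+1) 1)
      (q := fun m => decide (m < (sentence.length : Int) - t))
      (by intro m hm; rw [PySem.List.mem_pyRange_one] at hm
          simp only [decide_eq_decide]; omega),
    filter_pyRange_ge, filter_pyRange_lt, List.map_append, List.map_append]
  congr 1
  · rw [show (fun m => w2i d (PySem.List.pyGetD sentence (t + m) ""))
        = (w2i d) ∘ (fun m => PySem.List.pyGetD sentence (t + m) "") from rfl,
      ← List.map_map,
      pyRange_map_shift t (max (-w) (-t)) 0 (fun j => PySem.List.pyGetD sentence j ""),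
      show t + max (-w) (-t) = max 0 (t - w) by omega, show t + 0 = t by omega,
      map_pyGetD_pyRange_slice sentence "" _ _ (by omega) (by omega) (by omega)]
  · rw [show (fun m => w2i d (PySem.List.pyGetD sentence (t + m) ""))
        = (w2i d) ∘ (fun m => PySem.List.pyGetD sentence (t + m) "") from rfl,
      ← List.map_map,
      pyRange_map_shift t 1 (min (w + 1) ((sentence.length : Int) - t)) (fun j => PySem.List.pyGetD sentence j ""),
      show t + min (w + 1) ((sentence.length : Int) - t) = min (t + w + 1) (sentence.length : Int) by omega,
      map_pyGetD_pyRange_slice sentence "" _ _ (by omega) (by omega) (by omega),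
      slice_clamp_right sentence t w ht0 hw]



theorem context_eq (sentence : List String) (d : List (String × Int)) (w t : Int)
    (ht0 : 0 ≤ t) (htn : t < (sentence.length : Int)) :
    (PySem.List.pyRange (-w) (w + 1) 1).foldl (fun ctx m =>
        if m ≠ 0 ∧ t + m ≥ 0 ∧ t + m < (sentence.length : Int) then
          ctx ++ [w2i d (PySem.List.pyGetD sentence (t + m) "")]
        else ctx) []
      = (PySem.List.slice sentence (some (max 0 (t - w))) (some t)
          ++ PySem.List.slice sentence (some (t + 1)) (some (max (t + 1) (t + w + 1)))).map (w2i d) := by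
  by_cases hw : 0 ≤ w
  · rw [show max (t + 1) (t + w + 1) = t + w + 1 by omega]
    exact context_eq_nonneg sentence d w t hw ht0 htn
  · rw [PySem.List.pyRange_one_eq_nil (by omega), List.foldl_nil,
      PySem.List.slice_toNat sentence (by omega) (by omega),
      PySem.List.slice_toNat sentence (by omega) (by omega),
      show t.toNat - (max 0 (t - w)).toNat = 0 by omega,
      show (max (t + 1) (t + w + 1)).toNat - (t + 1).toNat = 0 by omega]
    simp

-- ===== VERDICT (by name: the statement is the Claim_ definition above) =====
theorem sample_training_spec : Claim_equal_sample_training := by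
  intro corpus word2idx window_size _ _
  unfold Spec_sample_training sample_training sample_training_alt
  simp only [PySem.List.foldl_append_singleton_eq_map, PySem.List.foldl_append_eq_flatMap,
    List.nil_append]
  apply List.flatMap_congr
  intro sentence _
  rw [PySem.List.enumerate_eq_map_pyRange sentence "", List.map_map]
  simp only [PySem.List.len_eq]
  apply List.map_congr_left
  intro t hm
  rw [PySem.List.mem_pyRange_one] at hm
  simp only [Function.comp]
  rw [context_eq sentence word2idx window_size t hm.1 hm.2]
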